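-- pv_equiv track=rewrite | github.com/ailensgroup/prism | src/icl_message_builder.py | _extract_ground_truth_from_qrel
-- ===== SOURCE A (Python) =====
-- def _extract_ground_truth_from_qrel(qrel: dict) -> list[int]:
--     """Extract ranked ground-truth indices from a qrel mapping.
--
--     Converts a qrel dict (e.g., ``{"0": 0, "1": 2, "25": 2, "32": 1}``) into
--     a list of indices sorted by descending relevance score, then ascending
--     index for ties. Only indices with positive scores are included. If none
--     are positive, the top scored indices (up to 10) are returned.
--
--     Args:
--         qrel (Dict): Mapping of string indices to integer relevance scores.
--
--     Returns:
--         List[int]: Ranked list of relevant indices.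
--     """
--     if not qrel:
--         return []
--
--     # Convert string keys to integers and create list of (index, score) tuples
--     scored_items = []
--     for idx_str, score in qrel.items():
--         try:
--             idx = int(idx_str)
--             scored_items.append((idx, score))
--         except (ValueError, TypeError):
--             continue
--
--     # Sort by score (descending), then by index (ascending) for ties
--     scored_items.sort(key=lambda x: (-x[1], x[0]))
--
--     # Return only indices with score > 0 (relevant items)
--     # Or return all if you want the full ranking
--     ground_truth = [idx for idx, score in scored_items if score > 0]
--
--     # If no relevant items, return top items anyway
--     if not ground_truth:
--         ground_truth = [idx for idx, score in scored_items[:10]]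
--
--     return ground_truth
-- ===== SOURCE B (Python) =====
-- def _extract_ground_truth_from_qrel(qrel: dict) -> list[int]:
--     """Group-by-score re-implementation: bucket indices per score, then walk
--     distinct scores in descending order, each bucket in ascending index order."""
--     buckets = {}
--     for idx_str, score in qrel.items():
--         try:
--             idx = int(idx_str)
--         except (ValueError, TypeError):
--             continue
--         buckets.setdefault(score, []).append(idx)
--
--     ranked_scores = sorted(buckets, reverse=True)
--
--     ground_truth = []
--     for score in ranked_scores:
--         if score > 0:
--             ground_truth.extend(sorted(buckets[score]))
--
--     if not ground_truth:
--         for score in ranked_scores: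
--             ground_truth.extend(sorted(buckets[score]))
--         ground_truth = ground_truth[:10]
--
--     return ground_truth
-- ===== Notes on version B (the rewrite author's own statement) =====
-- stated objective: alternative
-- what changed: Replaces the single composite-key (-score, index) comparison sort over all items by a group-by-score dict of buckets: indices are appended per score in one pass, then the distinct scores are walked in descending order with each bucket sorted ascending, collecting positive-score buckets (or the first 10 of the full ranking as fallback).
import Mathlib
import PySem

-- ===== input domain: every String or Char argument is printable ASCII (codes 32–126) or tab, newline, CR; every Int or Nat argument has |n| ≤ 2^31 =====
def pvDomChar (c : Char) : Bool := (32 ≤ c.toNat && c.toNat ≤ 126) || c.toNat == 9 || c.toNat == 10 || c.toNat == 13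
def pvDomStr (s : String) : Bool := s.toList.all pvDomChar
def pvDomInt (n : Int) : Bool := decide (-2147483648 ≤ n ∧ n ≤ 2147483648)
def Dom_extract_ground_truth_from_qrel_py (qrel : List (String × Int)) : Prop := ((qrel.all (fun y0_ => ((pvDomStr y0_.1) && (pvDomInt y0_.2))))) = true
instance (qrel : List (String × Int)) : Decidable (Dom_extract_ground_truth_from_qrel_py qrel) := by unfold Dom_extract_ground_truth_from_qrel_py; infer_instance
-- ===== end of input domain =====

-- B replaces A's single composite-key (-score, index) sort by a score→bucket dict walked in
-- descending-score / ascending-index order (objective: alternative decomposition, same cost).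
-- The qrel argument is a Python dict: both ports decode it with PySem.Dict.ofList first
-- (duplicate keys in the association list collapse exactly as when Python builds the dict).

-- ===== PORT A =====
-- scored_items loop: int(idx_str) inside try/except ValueError, appending (idx, score)
def pvScoredItems (items : List (String × Int)) : List (Int × Int) :=
  items.foldl (fun acc p =>
    match PySem.Int.ofStr? p.1 with
    | some idx => acc ++ [(idx, p.2)]
    | none => acc) []

def extract_ground_truth_from_qrel_py (qrel : List (String × Int)) : List Int :=
  let d := PySem.Dict.ofList qrel
  if d.items = [] then []
  else
    let scored_items := pvScoredItems d.items
    -- .sort(key=lambda x: (-x[1], x[0]))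
    let sorted_items := PySem.List.sorted2 scored_items (fun x => -x.2) (fun x => x.1)
    let ground_truth := (sorted_items.filter (fun x => decide (0 < x.2))).map (fun x => x.1)
    if ground_truth = [] then (PySem.List.slice sorted_items none (some 10)).map (fun x => x.1)
    else ground_truth

-- ===== PORT B =====
-- one pass: buckets.setdefault(score, []).append(idx)
def pvBuckets (items : List (String × Int)) : PySem.Dict Int (List Int) :=
  items.foldl (fun d p =>
    match PySem.Int.ofStr? p.1 with
    | some idx => d.modify p.2 [] (fun b => b ++ [idx])
    | none => d) PySem.Dict.empty

def extract_ground_truth_from_qrel_py_alt (qrel : List (String × Int)) : List Int :=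
  let buckets := pvBuckets (PySem.Dict.ofList qrel).items
  let ranked_scores := PySem.List.sorted buckets.keys (fun s => s) true
  let ground_truth := ranked_scores.foldl (fun acc s =>
      if 0 < s then acc ++ PySem.List.sorted (buckets.getD s []) (fun i => i) else acc) []
  if ground_truth = [] then
    PySem.List.slice (ranked_scores.foldl (fun acc s =>
      acc ++ PySem.List.sorted (buckets.getD s []) (fun i => i)) []) none (some 10)
  else ground_truth

-- ===== PRECONDITION & SPEC =====
def Spec_extract_ground_truth_from_qrel_py (qrel : List (String × Int)) (out : List Int) : Prop := out = extract_ground_truth_from_qrel_py_alt qrel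
instance (qrel : List (String × Int)) (out : List Int) : Decidable (Spec_extract_ground_truth_from_qrel_py qrel out) := by unfold Spec_extract_ground_truth_from_qrel_py; infer_instance

-- ===== CLAIM (what is proved, stated in full; the proofs are below) =====
def Claim_equal_extract_ground_truth_from_qrel_py : Prop := ∀ (qrel : List (String × Int)), Dom_extract_ground_truth_from_qrel_py qrel → Spec_extract_ground_truth_from_qrel_py qrel (extract_ground_truth_from_qrel_py qrel)

-- ===== LEMMAS AND PROOFS =====

-- A's per-item parse as a 0/1-element list
def pvParse (p : String × Int) : List (Int × Int) :=
  match PySem.Int.ofStr? p.1 with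
  | some idx => [(idx, p.2)]
  | none => []

-- the comparison sorted2 uses for the key (-score, idx)
def pvLt (p q : Int × Int) : Bool :=
  decide (-p.2 < -q.2) || (!decide (-q.2 < -p.2) && decide (p.1 < q.1))

-- the matching non-strict order: "p may come no later than q"
def pvR (p q : Int × Int) : Prop := q.2 < p.2 ∨ (p.2 = q.2 ∧ p.1 ≤ q.1)

-- the bucket of score s inside a scored list
def pvBucket (zs : List (Int × Int)) (s : Int) : List Int :=
  (zs.filter (fun q => q.2 == s)).map (fun q => q.1)

-- B's ranking, re-annotated with its scores
def pvYs (ranked : List Int) (zs : List (Int × Int)) : List (Int × Int) :=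
  ranked.flatMap (fun s => (PySem.List.sorted (pvBucket zs s) (fun i => i)).map (fun i => (i, s)))

lemma pvFlatMap_congr {α β : Type} (l : List α) (f g : α → List β)
    (h : ∀ a ∈ l, f a = g a) : l.flatMap f = l.flatMap g := by
  induction l with
  | nil => rfl
  | cons a t ih =>
    simp only [List.flatMap_cons, h a (by simp), ih (fun x hx => h x (by simp [hx]))]

lemma pvScored_aux (items : List (String × Int)) (acc : List (Int × Int)) :
    items.foldl (fun acc p =>
      match PySem.Int.ofStr? p.1 with
      | some idx => acc ++ [(idx, p.2)]
      | none => acc) acc = acc ++ items.flatMap pvParse := by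
  induction items generalizing acc with
  | nil => simp
  | cons p rest ih =>
    simp only [List.foldl_cons, List.flatMap_cons]
    cases h : PySem.Int.ofStr? p.1 <;> simp [pvParse, h, ih]

lemma pvScoredItems_eq (items : List (String × Int)) :
    pvScoredItems items = items.flatMap pvParse := by
  simpa using pvScored_aux items []

lemma pvBuckets_aux (items : List (String × Int)) (d : PySem.Dict Int (List Int)) :
    items.foldl (fun d p =>
      match PySem.Int.ofStr? p.1 with
      | some idx => d.modify p.2 [] (fun b => b ++ [idx])
      | none => d) d
    = (items.flatMap pvParse).foldl (fun d q => d.modify q.2 [] (fun b => b ++ [q.1])) d := by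
  induction items generalizing d with
  | nil => rfl
  | cons p rest ih =>
    simp only [List.foldl_cons, List.flatMap_cons, List.foldl_append]
    cases h : PySem.Int.ofStr? p.1 <;> simp [pvParse, h, ih]

lemma pvBuckets_eq (items : List (String × Int)) :
    pvBuckets items =
      (pvScoredItems items).foldl (fun d q => d.modify q.2 [] (fun b => b ++ [q.1]))
        PySem.Dict.empty := by
  rw [pvScoredItems_eq]; exact pvBuckets_aux items PySem.Dict.empty

lemma pvModifyFold_getD (l : List (Int × Int)) (d : PySem.Dict Int (List Int)) (s : Int) :
    (l.foldl (fun d q => d.modify q.2 [] (fun b => b ++ [q.1])) d).getD s []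
      = d.getD s [] ++ pvBucket l s := by
  have h := PySem.Dict.getD_foldl_modify_append (l.map (fun q => (q.2, q.1))) d s
  rw [List.foldl_map] at h
  simpa [pvBucket, List.filter_map, Function.comp] using h

lemma pvBuckets_getD (items : List (String × Int)) (s : Int) :
    (pvBuckets items).getD s [] = pvBucket (pvScoredItems items) s := by
  rw [pvBuckets_eq, pvModifyFold_getD]
  simp

lemma pvBuckets_keys_nodup (items : List (String × Int)) : (pvBuckets items).keys.Nodup := by
  rw [pvBuckets_eq]
  have h := PySem.Dict.nodup_keys_foldl_modify_key (pvScoredItems items) (fun q => q.2)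
      ([] : List Int) (fun _ q => fun b => b ++ [q.1]) PySem.Dict.empty
  exact h (by simp)

lemma pvBuckets_keys_mem (items : List (String × Int)) (s : Int) :
    s ∈ (pvBuckets items).keys ↔ s ∈ (pvScoredItems items).map (fun q => q.2) := by
  rw [pvBuckets_eq]
  have h := PySem.Dict.keys_foldl_modify_key (pvScoredItems items) (fun q => q.2)
      ([] : List Int) (fun _ q => fun b => b ++ [q.1]) PySem.Dict.empty
  rw [h]
  have : PySem.Set.update (PySem.Dict.empty : PySem.Dict Int (List Int)).keys
      ((pvScoredItems items).map (fun q => q.2))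
      = PySem.Set.ofList ((pvScoredItems items).map (fun q => q.2)) := by
    rfl
  rw [this, PySem.Set.mem_ofList]

lemma pvR_trans {p q w : Int × Int} : pvR p q → pvR q w → pvR p w := by
  rcases p with ⟨a, b⟩; rcases q with ⟨c, d⟩; rcases w with ⟨e, f⟩
  unfold pvR; dsimp only; omega

lemma pvR_antisymm {p q : Int × Int} : pvR p q → pvR q p → p = q := by
  rcases p with ⟨a, b⟩; rcases q with ⟨c, d⟩
  unfold pvR; dsimp only
  intro h1 h2
  have : a = c ∧ b = d := by omega
  simp [this.1, this.2]

lemma pvLt_false_iff {p q : Int × Int} : pvLt q p = false ↔ pvR p q := by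
  rcases p with ⟨a, b⟩; rcases q with ⟨c, d⟩
  unfold pvLt pvR; dsimp only
  simp only [Bool.or_eq_false_iff, Bool.and_eq_false_iff, Bool.not_eq_false',
    decide_eq_false_iff_not, decide_eq_true_eq, not_lt]
  omega

lemma pvLt_asymm {p q : Int × Int} (h : pvLt p q = true) : pvLt q p = false := by
  rcases p with ⟨a, b⟩; rcases q with ⟨c, d⟩
  unfold pvLt at h ⊢; dsimp only at h ⊢
  simp only [Bool.or_eq_true, Bool.and_eq_true, Bool.not_eq_true', decide_eq_true_eq,
    decide_eq_false_iff_not, not_lt] at h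
  simp only [Bool.or_eq_false_iff, Bool.and_eq_false_iff, Bool.not_eq_false',
    decide_eq_false_iff_not, decide_eq_true_eq, not_lt]
  omega

lemma pw_insertBy (x : Int × Int) (acc : List (Int × Int))
    (h : acc.Pairwise pvR) : (PySem.List.insertBy pvLt x acc).Pairwise pvR := by
  induction acc with
  | nil => simp [PySem.List.insertBy]
  | cons y ys ih =>
    rw [List.pairwise_cons] at h
    obtain ⟨hy, hys⟩ := h
    by_cases hlt : pvLt x y = true
    · rw [show PySem.List.insertBy pvLt x (y :: ys) = x :: y :: ys by
        simp [PySem.List.insertBy, hlt]]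
      refine List.Pairwise.cons ?_ (List.Pairwise.cons hy hys)
      intro z hz
      have hxy : pvR x y := pvLt_false_iff.mp (pvLt_asymm hlt)
      rcases List.mem_cons.mp hz with rfl | hz'
      · exact hxy
      · exact pvR_trans hxy (hy z hz')
    · rw [show PySem.List.insertBy pvLt x (y :: ys) = y :: PySem.List.insertBy pvLt x ys by
        simp [PySem.List.insertBy, hlt]]
      refine List.Pairwise.cons ?_ (ih hys)
      intro z hz
      rcases (PySem.List.mem_insertBy pvLt x z ys).mp hz with rfl | hz'
      · exact pvLt_false_iff.mp (Bool.not_eq_true _ ▸ Bool.of_not_eq_true hlt)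
      · exact hy z hz'

lemma pw_foldl (xs : List (Int × Int)) (acc : List (Int × Int))
    (h : acc.Pairwise pvR) :
    (xs.foldl (fun acc x => PySem.List.insertBy pvLt x acc) acc).Pairwise pvR := by
  induction xs generalizing acc with
  | nil => exact h
  | cons x t ih => exact ih _ (pw_insertBy x acc h)

lemma sorted2_pairwise (zs : List (Int × Int)) :
    (PySem.List.sorted2 zs (fun x => -x.2) (fun x => x.1)).Pairwise pvR := by
  have hdef : PySem.List.sorted2 zs (fun x : Int × Int => -x.2) (fun x => x.1)
      = zs.foldl (fun acc x => PySem.List.insertBy pvLt x acc) [] := rfl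
  rw [hdef]
  exact pw_foldl zs [] List.Pairwise.nil

lemma pvYs_perm (ranked : List Int) (zs : List (Int × Int))
    (hnd : ranked.Nodup) (hmem : ∀ p ∈ zs, p.2 ∈ ranked) :
    (pvYs ranked zs).Perm zs := by
  induction ranked generalizing zs with
  | nil =>
    have hz : zs = [] := by
      cases zs with
      | nil => rfl
      | cons p t => exact absurd (hmem p (by simp)) (by simp)
    simp [pvYs, hz]
  | cons s rest ih =>
    rw [List.nodup_cons] at hnd
    have hsplit := List.filter_append_perm (fun q => q.2 == s) zs
    have hchunk : ((PySem.List.sorted (pvBucket zs s) (fun i => i)).map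
        (fun i => ((i : Int), s))).Perm (zs.filter (fun q => q.2 == s)) := by
      have h1 := (PySem.List.sorted_perm (pvBucket zs s) (fun i => i) false).map
        (fun i => ((i : Int), s))
      refine h1.trans ?_
      rw [pvBucket, List.map_map]
      have h3 : ∀ q ∈ zs.filter (fun q => q.2 == s),
          ((fun i => ((i : Int), s)) ∘ fun q : Int × Int => q.1) q = q := by
        intro q hq
        have h4 := (List.mem_filter.mp hq).2
        rcases q with ⟨i, t⟩
        simp only [beq_iff_eq] at h4
        simp [Function.comp, h4]
      rw [List.map_congr_left h3, List.map_id']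
    have hb : ∀ s' ∈ rest,
        pvBucket zs s' = pvBucket (zs.filter (fun q => !(q.2 == s))) s' := by
      intro s' hs'
      have hne : s' ≠ s := fun h => hnd.1 (h ▸ hs')
      unfold pvBucket
      rw [List.filter_filter]
      congr 1
      apply List.filter_congr
      intro q _
      by_cases h : q.2 = s'
      · simp [h, hne]
      · simp [h]
    have hmem' : ∀ p ∈ zs.filter (fun q => !(q.2 == s)), p.2 ∈ rest := by
      intro p hp
      have h1 := (List.mem_filter.mp hp).1
      have h2 := (List.mem_filter.mp hp).2
      have h3 := hmem p h1
      simp only [Bool.not_eq_true', beq_eq_false_iff_ne, ne_eq] at h2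
      rcases List.mem_cons.mp h3 with h4 | h4
      · exact absurd h4 h2
      · exact h4
    have hrest := ih (zs.filter (fun q => !(q.2 == s))) hnd.2 hmem'
    have hcongr : pvYs rest zs = pvYs rest (zs.filter (fun q => !(q.2 == s))) := by
      unfold pvYs
      exact pvFlatMap_congr _ _ _ (fun s' hs' => by rw [hb s' hs'])
    unfold pvYs
    rw [List.flatMap_cons]
    refine List.Perm.trans (List.Perm.append hchunk ?_) hsplit
    rw [show (rest.flatMap fun s =>
        (PySem.List.sorted (pvBucket zs s) fun i => i).map fun i => (i, s)) = pvYs rest zs from rfl]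
    rw [hcongr]
    exact hrest

lemma pvYs_pairwise (ranked : List Int) (zs : List (Int × Int))
    (hgt : ranked.Pairwise (fun a b => b < a)) :
    (pvYs ranked zs).Pairwise pvR := by
  unfold pvYs
  rw [List.pairwise_flatMap]
  constructor
  · intro s _
    rw [List.pairwise_map]
    refine (PySem.List.sorted_pairwise (pvBucket zs s) (fun i => i)).imp ?_
    intro a b hab
    exact Or.inr ⟨rfl, hab⟩
  · refine hgt.imp ?_
    intro a b hba x hx y hy
    obtain ⟨i, _, rfl⟩ := List.mem_map.mp hx
    obtain ⟨j, _, rfl⟩ := List.mem_map.mp hy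
    exact Or.inl hba

lemma sorted2_eq_pvYs (ranked : List Int) (zs : List (Int × Int))
    (hnd : ranked.Nodup) (hmem : ∀ p ∈ zs, p.2 ∈ ranked)
    (hgt : ranked.Pairwise (fun a b => b < a)) :
    PySem.List.sorted2 zs (fun x => -x.2) (fun x => x.1) = pvYs ranked zs := by
  refine List.Perm.eq_of_pairwise (fun a b _ _ h1 h2 => pvR_antisymm h1 h2)
    (sorted2_pairwise zs) (pvYs_pairwise ranked zs hgt) ?_
  exact (PySem.List.sorted2_perm zs _ _ false).trans (pvYs_perm ranked zs hnd hmem).symm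

lemma pvFoldl_if_append {α : Type} (g : Int → List α) (l : List Int) (acc : List α) :
    l.foldl (fun acc s => if 0 < s then acc ++ g s else acc) acc
      = acc ++ l.flatMap (fun s => if 0 < s then g s else []) := by
  induction l generalizing acc with
  | nil => simp
  | cons s t ih => by_cases h : 0 < s <;> simp [h, ih]

lemma pvChunkFilter (zs : List (Int × Int)) (s : Int) :
    (((PySem.List.sorted (pvBucket zs s) (fun i => i)).map (fun i => ((i : Int), s))).filter
        (fun x => decide (0 < x.2))).map (fun x => x.1)
      = if 0 < s then PySem.List.sorted (pvBucket zs s) (fun i => i) else [] := by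
  rw [List.filter_map]
  by_cases h : 0 < s
  · simp [Function.comp_def, h]
  · simp [Function.comp_def, h]

lemma pvYs_filter_map (ranked : List Int) (zs : List (Int × Int)) :
    ((pvYs ranked zs).filter (fun x => decide (0 < x.2))).map (fun x => x.1)
      = ranked.flatMap (fun s => if 0 < s then PySem.List.sorted (pvBucket zs s) (fun i => i) else []) := by
  unfold pvYs
  rw [List.filter_flatMap, List.map_flatMap]
  exact pvFlatMap_congr _ _ _ (fun s _ => pvChunkFilter zs s)

lemma pvYs_map_fst (ranked : List Int) (zs : List (Int × Int)) :
    (pvYs ranked zs).map (fun x => x.1)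
      = ranked.flatMap (fun s => PySem.List.sorted (pvBucket zs s) (fun i => i)) := by
  unfold pvYs
  rw [List.map_flatMap]
  exact pvFlatMap_congr _ _ _ (fun s _ => by simp [List.map_map, Function.comp_def])

-- ===== VERDICT (by name: the statement is the Claim_ definition above) =====
theorem extract_ground_truth_from_qrel_py_spec : Claim_equal_extract_ground_truth_from_qrel_py := by
  intro qrel _
  unfold Spec_extract_ground_truth_from_qrel_py
  unfold extract_ground_truth_from_qrel_py extract_ground_truth_from_qrel_py_alt
  dsimp only
  set items := (PySem.Dict.ofList qrel).items with hitems
  by_cases hhe : items = []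
  · rw [hhe]
    rfl
  · rw [if_neg hhe]
    set zs := pvScoredItems items with hzs
    set ranked := PySem.List.sorted (pvBuckets items).keys (fun s => s) true with hranked
    have hnd : ranked.Nodup :=
      ((PySem.List.sorted_perm (pvBuckets items).keys (fun s => s) true).nodup_iff).mpr
        (pvBuckets_keys_nodup items)
    have hmem : ∀ p ∈ zs, p.2 ∈ ranked := by
      intro p hp
      rw [hranked, PySem.List.mem_sorted, pvBuckets_keys_mem]
      exact List.mem_map_of_mem hp
    have hgt : ranked.Pairwise (fun a b => b < a) := by
      have h1 := PySem.List.sorted_pairwise_rev (pvBuckets items).keys (fun s => s)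
      exact (h1.and hnd).imp (fun hab => lt_of_le_of_ne hab.1 hab.2.symm)
    have hkey := sorted2_eq_pvYs ranked zs hnd hmem hgt
    simp only [pvBuckets_getD, ← hzs, hkey]
    rw [pvFoldl_if_append, PySem.List.foldl_append_eq_flatMap]
    rw [pvYs_filter_map]
    rw [PySem.List.slice_to _ (by norm_num), PySem.List.slice_to _ (by norm_num),
      List.map_take, pvYs_map_fst]
    simp
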